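-- pv_equiv track=rewrite | github.com/micahkberg/advent-of-code-2020 | code-11-9.py | calc_update_array_sightline_neighbors
-- ===== SOURCE A (Python) =====
-- import itertools
--
-- def get_sightline_neighbors(col,row,arr):
--     dirs = list(itertools.product([-1,0,1],repeat=2))
--     dirs.remove((0,0))
--     count = 0
--     for dir in dirs:
--         neighbor = "."
--         neighbor_loc = [row+dir[0],col+dir[1]]
--         while neighbor == "." and 0<=(neighbor_loc[0])<(len(arr)) and 0<=neighbor_loc[1]<(len(arr[0])):
--             neighbor = arr[neighbor_loc[0]][neighbor_loc[1]]
--             neighbor_loc = [neighbor_loc[0]+dir[0],neighbor_loc[1]+dir[1]]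
--         if neighbor=="#":
--             count+=1
--     return count
--
-- def calc_update_array_sightline_neighbors(arr):
--     new_arr = []
--     stable = True
--     for row_num in range(len(arr)):
--         new_row = ""
--         for col_num in range(len(arr[0])):
--             tile = arr[row_num][col_num]
--             if tile == "#" and get_sightline_neighbors(col_num,row_num,arr)>=5:
--                 new_row += "L"
--                 stable = False
--             elif tile == "L" and get_sightline_neighbors(col_num,row_num,arr)==0:
--                 new_row += "#"
--                 stable = False
--             else:
--                 new_row += tile
--         new_arr.append(new_row)
--
--     return(new_arr,stable)
-- ===== SOURCE B (Python) =====
-- def calc_update_array_sightline_neighbors(arr):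
--     if not arr:
--         return ([], True)
--     R, W = len(arr), len(arr[0])
--     dirs = [(-1, -1), (-1, 0), (-1, 1), (0, -1), (0, 1), (1, -1), (1, 0), (1, 1)]
--     memo = {}
--
--     def vis(dr, dc, r, c):
--         # nearest non-floor char visible from (r, c) in direction (dr, dc),
--         # memoized with path compression: every cell on a run of '.' sees the
--         # same terminator, so the whole walked path is resolved at once.
--         path = []
--         while True:
--             key = (dr, dc, r, c)
--             if key in memo:
--                 res = memo[key]
--                 break
--             path.append(key)
--             r += dr
--             c += dc
--             if not (0 <= r < R and 0 <= c < W):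
--                 res = "."
--                 break
--             ch = arr[r][c]
--             if ch != ".":
--                 res = ch
--                 break
--         for key in path:
--             memo[key] = res
--         return res
--
--     new_arr = []
--     stable = True
--     for r in range(R):
--         row_chars = []
--         for c in range(W):
--             tile = arr[r][c]
--             if tile == "#" or tile == "L":
--                 occ = 0
--                 for (dr, dc) in dirs:
--                     if vis(dr, dc, r, c) == "#":
--                         occ += 1
--                 if tile == "#" and occ >= 5:
--                     row_chars.append("L")
--                     stable = False
--                 elif tile == "L" and occ == 0:
--                     row_chars.append("#")
--                     stable = False
--                 else:
--                     row_chars.append(tile)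
--             else:
--                 row_chars.append(tile)
--         new_arr.append("".join(row_chars))
--     return (new_arr, stable)
-- ===== Notes on version B (the rewrite author's own statement) =====
-- stated objective: alternative
-- what changed: A re-scans all 8 sightline rays from scratch for every seat; B resolves each (cell, direction) visibility at most once via a memo dict with path compression (a walked run of floor cells is written back in one pass), replacing per-cell ray marching by shared dynamic programming.
import Mathlib
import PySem

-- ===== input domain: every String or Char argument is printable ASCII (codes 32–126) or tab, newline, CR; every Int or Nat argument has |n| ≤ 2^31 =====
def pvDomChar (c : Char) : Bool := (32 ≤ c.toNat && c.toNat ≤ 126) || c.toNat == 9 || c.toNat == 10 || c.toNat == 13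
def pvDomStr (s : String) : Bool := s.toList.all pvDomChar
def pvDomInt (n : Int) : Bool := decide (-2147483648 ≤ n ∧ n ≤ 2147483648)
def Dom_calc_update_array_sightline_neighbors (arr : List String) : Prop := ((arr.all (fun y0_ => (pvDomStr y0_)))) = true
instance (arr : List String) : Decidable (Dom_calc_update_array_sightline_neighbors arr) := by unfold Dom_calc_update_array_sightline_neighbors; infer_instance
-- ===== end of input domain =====

-- B replaces A's per-cell 8-direction ray re-scan by a memoized visibility
-- propagation with path compression (each (cell, direction) resolved at most
-- once); objective: alternative (not measured faster).

-- ===== PORT A =====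

-- arr[r][c]; the '.'-default is reached only outside Pre_ (where Python raises)
def pvCell (arr : List String) (r c : Int) : Char :=
  (((PySem.List.pyGet? arr r).bind (fun s => PySem.Str.pyGet? s c)).getD '.')

-- list(itertools.product([-1,0,1], repeat=2)) with (0,0) removed, in that order
def pvDirsA : List (Int × Int) :=
  [(-1, -1), (-1, 0), (-1, 1), (0, -1), (0, 1), (1, -1), (1, 0), (1, 1)]

-- the 'while neighbor == "." and in-bounds' loop; fuel R+W+1 is never exhausted
def pvSightWhile (arr : List String) (R W dr dc : Int) :
    Nat → Char → Int × Int → Char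
  | 0, nb, _ => nb
  | fuel + 1, nb, loc =>
    if nb = '.' ∧ 0 ≤ loc.1 ∧ loc.1 < R ∧ 0 ≤ loc.2 ∧ loc.2 < W then
      pvSightWhile arr R W dr dc fuel (pvCell arr loc.1 loc.2) (loc.1 + dr, loc.2 + dc)
    else nb

def get_sightline_neighbors (col row : Int) (arr : List String) : Int :=
  pvDirsA.foldl (fun count d =>
    let nb := pvSightWhile arr (arr.length : Int) (((arr.headD "").length : Int)) d.1 d.2
      (arr.length + (arr.headD "").length + 1) '.' (row + d.1, col + d.2)
    if nb = '#' then count + 1 else count) 0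

def calc_update_array_sightline_neighbors (arr : List String) : List String × Bool :=
  (List.range arr.length).foldl (fun (acc : List String × Bool) (row_num : Nat) =>
    let inner := (List.range (arr.headD "").length).foldl
      (fun (acc2 : String × Bool) (col_num : Nat) =>
        let tile := pvCell arr (row_num : Int) (col_num : Int)
        if tile = '#' ∧ 5 ≤ get_sightline_neighbors (col_num : Int) (row_num : Int) arr then
          (acc2.1.push 'L', false)
        else if tile = 'L' ∧ get_sightline_neighbors (col_num : Int) (row_num : Int) arr = 0 then
          (acc2.1.push '#', false)
        else (acc2.1.push tile, acc2.2)) ("", acc.2)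
    (acc.1 ++ [inner.1], inner.2)) ([], true)

-- ===== PORT B =====

def pvDirsB : List (Int × Int) :=
  [(-1, -1), (-1, 0), (-1, 1), (0, -1), (0, 1), (1, -1), (1, 0), (1, 1)]

-- the 'while True' walk of vis(); fuel R+W+1 is never exhausted
def pvWalk (arr : List String) (R W dr dc : Int) :
    Nat → Int → Int → PySem.Dict (Int × Int × Int × Int) Char →
    List (Int × Int × Int × Int) → Char × List (Int × Int × Int × Int)
  | 0, _, _, _, path => ('.', path)
  | fuel + 1, r, c, memo, path =>
    match memo.get? (dr, dc, r, c) with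
    | some v => (v, path)
    | none =>
      let path' := path ++ [(dr, dc, r, c)]
      let r' := r + dr
      let c' := c + dc
      if 0 ≤ r' ∧ r' < R ∧ 0 ≤ c' ∧ c' < W then
        let ch := pvCell arr r' c'
        if ch ≠ '.' then (ch, path')
        else pvWalk arr R W dr dc fuel r' c' memo path'
      else ('.', path')

-- vis(dr, dc, r, c): run the walk, then write res back over the whole path
def pvVis (arr : List String) (R W dr dc r c : Int)
    (memo : PySem.Dict (Int × Int × Int × Int) Char) :
    Char × PySem.Dict (Int × Int × Int × Int) Char :=
  let rp := pvWalk arr R W dr dc (R.toNat + W.toNat + 1) r c memo []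
  (rp.1, rp.2.foldl (fun m k => m.insert k rp.1) memo)

-- the 'for (dr, dc) in dirs: if vis(...) == "#": occ += 1' loop
def pvOccLoop (arr : List String) (R W r c : Int)
    (memo : PySem.Dict (Int × Int × Int × Int) Char) :
    Int × PySem.Dict (Int × Int × Int × Int) Char :=
  pvDirsB.foldl (fun (oc : Int × PySem.Dict (Int × Int × Int × Int) Char) d =>
    let vm := pvVis arr R W d.1 d.2 r c oc.2
    (if vm.1 = '#' then oc.1 + 1 else oc.1, vm.2)) (0, memo)

def calc_update_array_sightline_neighbors_alt (arr : List String) : List String × Bool :=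
  if arr.isEmpty then ([], true) else
  let R : Int := arr.length
  let W : Int := (arr.headD "").length
  let z := (List.range arr.length).foldl
    (fun (acc : List String × Bool × PySem.Dict (Int × Int × Int × Int) Char) (r : Nat) =>
      let inner := (List.range (arr.headD "").length).foldl
        (fun (st : List Char × Bool × PySem.Dict (Int × Int × Int × Int) Char) (c : Nat) =>
          let tile := pvCell arr (r : Int) (c : Int)
          if tile = '#' ∨ tile = 'L' then
            let o := pvOccLoop arr R W (r : Int) (c : Int) st.2.2
            if tile = '#' ∧ 5 ≤ o.1 then (st.1 ++ ['L'], false, o.2)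
            else if tile = 'L' ∧ o.1 = 0 then (st.1 ++ ['#'], false, o.2)
            else (st.1 ++ [tile], st.2.1, o.2)
          else (st.1 ++ [tile], st.2.1, st.2.2)) ([], acc.2.1, acc.2.2)
      (acc.1 ++ [String.ofList inner.1], inner.2.1, inner.2.2))
    ([], true, PySem.Dict.empty)
  (z.1, z.2.1)

-- ===== PRECONDITION & SPEC =====
-- Pre_ excludes exactly the inputs where Python A raises IndexError:
-- some row is shorter than the first row (A reads every column index < len(arr[0]) of every row).
def Pre_calc_update_array_sightline_neighbors (arr : List String) : Prop :=
  ∀ s ∈ arr, (arr.headD "").length ≤ s.length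
instance (arr : List String) : Decidable (Pre_calc_update_array_sightline_neighbors arr) := by
  unfold Pre_calc_update_array_sightline_neighbors; infer_instance

def pvWitness_calc_update_array_sightline_neighbors : List String := ["L.L", ".#.", "L.L"]

def Spec_calc_update_array_sightline_neighbors (arr : List String) (out : List String × Bool) : Prop := out = calc_update_array_sightline_neighbors_alt arr
instance (arr : List String) (out : List String × Bool) : Decidable (Spec_calc_update_array_sightline_neighbors arr out) := by unfold Spec_calc_update_array_sightline_neighbors; infer_instance

-- ===== CLAIM (what is proved, stated in full; the proofs are below) =====
def Claim_equal_calc_update_array_sightline_neighbors : Prop := ∀ (arr : List String), Dom_calc_update_array_sightline_neighbors arr → Pre_calc_update_array_sightline_neighbors arr → Spec_calc_update_array_sightline_neighbors arr (calc_update_array_sightline_neighbors arr)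

-- ===== LEMMAS AND PROOFS =====

-- the mathematical visible-seat value both ports compute (proof-only; well-founded)
def pvMsr (R W dr dc r c : Int) : Nat :=
  (if 0 < dr then R - r else if dr < 0 then r + 1 else if 0 < dc then W - c else c + 1).toNat

theorem pvMsr_lt (R W dr dc r c : Int) (hd : ¬(dr = 0 ∧ dc = 0))
    (h1 : 0 ≤ r + dr) (h2 : r + dr < R) (h3 : 0 ≤ c + dc) (h4 : c + dc < W) :
    pvMsr R W dr dc (r + dr) (c + dc) < pvMsr R W dr dc r c := by
  unfold pvMsr; split_ifs <;> omega

def pvRay (arr : List String) (R W dr dc r c : Int) : Char :=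
  if _h : ¬(dr = 0 ∧ dc = 0) ∧ 0 ≤ r + dr ∧ r + dr < R ∧ 0 ≤ c + dc ∧ c + dc < W then
    let ch := pvCell arr (r + dr) (c + dc)
    if ch ≠ '.' then ch else pvRay arr R W dr dc (r + dr) (c + dc)
  else '.'
termination_by pvMsr R W dr dc r c
decreasing_by exact pvMsr_lt R W dr dc r c _h.1 _h.2.1 _h.2.2.1 _h.2.2.2.1 _h.2.2.2.2

def pvRayK (arr : List String) (R W : Int) (k : Int × Int × Int × Int) : Char :=
  pvRay arr R W k.1 k.2.1 k.2.2.1 k.2.2.2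

def pvInv (arr : List String) (R W : Int)
    (m : PySem.Dict (Int × Int × Int × Int) Char) : Prop :=
  ∀ k v, m.get? k = some v → v = pvRayK arr R W k

theorem pvSightWhile_stuck (arr : List String) (R W dr dc : Int) (f : Nat) (nb : Char)
    (loc : Int × Int) (h : nb ≠ '.') : pvSightWhile arr R W dr dc f nb loc = nb := by
  cases f <;> simp [pvSightWhile, h]

theorem pvSightWhile_eq_ray (arr : List String) (R W dr dc : Int)
    (hd : ¬(dr = 0 ∧ dc = 0)) :
    ∀ (f : Nat) (r c : Int), pvMsr R W dr dc r c < f →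
      pvSightWhile arr R W dr dc f '.' (r + dr, c + dc) = pvRay arr R W dr dc r c := by
  intro f
  induction f with
  | zero => intro r c h; exact absurd h (Nat.not_lt_zero _)
  | succ f ih =>
    intro r c h
    rw [pvRay]
    by_cases hb : 0 ≤ r + dr ∧ r + dr < R ∧ 0 ≤ c + dc ∧ c + dc < W
    · rw [dif_pos ⟨hd, hb⟩]
      simp only [pvSightWhile]
      rw [if_pos ⟨trivial, hb.1, hb.2.1, hb.2.2.1, hb.2.2.2⟩]
      by_cases hch : pvCell arr (r + dr) (c + dc) = '.'
      · rw [hch]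
        rw [ih (r + dr) (c + dc)
          (by have := pvMsr_lt R W dr dc r c hd hb.1 hb.2.1 hb.2.2.1 hb.2.2.2; omega)]
        simp
      · rw [pvSightWhile_stuck arr R W dr dc f _ _ hch]
        simp [hch]
    · rw [dif_neg (by tauto)]
      simp only [pvSightWhile]
      rw [if_neg (by tauto)]

theorem pvWalk_eq_ray (arr : List String) (R W dr dc : Int)
    (hd : ¬(dr = 0 ∧ dc = 0)) :
    ∀ (f : Nat) (r c : Int) (memo : PySem.Dict (Int × Int × Int × Int) Char)
      (path : List (Int × Int × Int × Int)), pvInv arr R W memo → pvMsr R W dr dc r c < f →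
      (pvWalk arr R W dr dc f r c memo path).1 = pvRay arr R W dr dc r c ∧
      ∃ ext, (pvWalk arr R W dr dc f r c memo path).2 = path ++ ext ∧
        ∀ k ∈ ext, pvRayK arr R W k = pvRay arr R W dr dc r c := by
  intro f
  induction f with
  | zero => intro r c memo path hm h; exact absurd h (Nat.not_lt_zero _)
  | succ f ih =>
    intro r c memo path hm h
    simp only [pvWalk]
    cases hget : memo.get? (dr, dc, r, c) with
    | some v =>
      refine ⟨?_, [], by simp, by simp⟩
      exact hm _ _ hget
    | none =>
      by_cases hb : 0 ≤ r + dr ∧ r + dr < R ∧ 0 ≤ c + dc ∧ c + dc < W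
      · by_cases hch : pvCell arr (r + dr) (c + dc) = '.'
        · rw [if_pos hb, if_neg (by simpa using hch)]
          obtain ⟨h1, ext, h2, h3⟩ := ih (r + dr) (c + dc) memo (path ++ [(dr, dc, r, c)]) hm
            (by have := pvMsr_lt R W dr dc r c hd hb.1 hb.2.1 hb.2.2.1 hb.2.2.2; omega)
          have hray : pvRay arr R W dr dc r c = pvRay arr R W dr dc (r + dr) (c + dc) := by
            rw [pvRay, dif_pos ⟨hd, hb⟩]; simp [hch]
          refine ⟨by rw [h1, hray], (dr, dc, r, c) :: ext, by simpa using h2, ?_⟩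
          intro k hk
          rcases List.mem_cons.mp hk with hk | hk
          · subst hk; exact rfl
          · rw [h3 k hk, hray]
        · rw [if_pos hb, if_pos (by simpa using hch)]
          have hray : pvRay arr R W dr dc r c = pvCell arr (r + dr) (c + dc) := by
            rw [pvRay, dif_pos ⟨hd, hb⟩]; simp [hch]
          refine ⟨hray.symm, [(dr, dc, r, c)], by simp, ?_⟩
          intro k hk
          rcases List.mem_singleton.mp hk with rfl
          exact rfl
      · rw [if_neg hb]
        have hray : pvRay arr R W dr dc r c = '.' := by
          rw [pvRay, dif_neg (by tauto)]
        refine ⟨hray.symm, [(dr, dc, r, c)], by simp, ?_⟩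
        intro k hk
        rcases List.mem_singleton.mp hk with rfl
        exact rfl

theorem pvInv_foldl_insert (arr : List String) (R W : Int)
    (l : List (Int × Int × Int × Int)) (v : Char)
    (m : PySem.Dict (Int × Int × Int × Int) Char)
    (hl : ∀ k ∈ l, pvRayK arr R W k = v) (hm : pvInv arr R W m) :
    pvInv arr R W (l.foldl (fun m k => m.insert k v) m) := by
  induction l generalizing m with
  | nil => exact hm
  | cons k l ih =>
    simp only [List.foldl_cons]
    refine ih (m.insert k v) (fun j hj => hl j (List.mem_cons_of_mem k hj)) ?_
    intro j w hjw
    rw [PySem.Dict.get?_insert] at hjw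
    split_ifs at hjw with hjk
    · cases hjw; subst hjk; exact (hl _ List.mem_cons_self).symm
    · exact hm j w hjw

theorem pvVis_eq_ray (arr : List String) (R W dr dc r c : Int)
    (memo : PySem.Dict (Int × Int × Int × Int) Char)
    (hd : ¬(dr = 0 ∧ dc = 0)) (hm : pvInv arr R W memo)
    (hr1 : 0 ≤ r) (hr2 : r < R) (hc1 : 0 ≤ c) (hc2 : c < W) :
    (pvVis arr R W dr dc r c memo).1 = pvRay arr R W dr dc r c ∧
    pvInv arr R W (pvVis arr R W dr dc r c memo).2 := by
  have hf : pvMsr R W dr dc r c < R.toNat + W.toNat + 1 := by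
    unfold pvMsr; split_ifs <;> omega
  obtain ⟨h1, ext, h2, h3⟩ :=
    pvWalk_eq_ray arr R W dr dc hd (R.toNat + W.toNat + 1) r c memo [] hm hf
  simp only [pvVis]
  rw [h1, h2]
  simp only [List.nil_append]
  exact ⟨trivial, pvInv_foldl_insert arr R W ext _ memo h3 hm⟩

theorem pvOcc_eq_gsn (arr : List String) (r c : Int)
    (memo : PySem.Dict (Int × Int × Int × Int) Char)
    (hm : pvInv arr (arr.length : Int) ((arr.headD "").length : Int) memo)
    (hr1 : 0 ≤ r) (hr2 : r < (arr.length : Int))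
    (hc1 : 0 ≤ c) (hc2 : c < ((arr.headD "").length : Int)) :
    (pvOccLoop arr (arr.length : Int) ((arr.headD "").length : Int) r c memo).1
      = get_sightline_neighbors c r arr ∧
    pvInv arr (arr.length : Int) ((arr.headD "").length : Int)
      (pvOccLoop arr (arr.length : Int) ((arr.headD "").length : Int) r c memo).2 := by
  have aux : ∀ (ds : List (Int × Int)), (∀ d ∈ ds, ¬(d.1 = 0 ∧ d.2 = 0)) →
      ∀ (cnt : Int) (m : PySem.Dict (Int × Int × Int × Int) Char),
      pvInv arr (arr.length : Int) ((arr.headD "").length : Int) m →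
      (ds.foldl (fun (oc : Int × PySem.Dict (Int × Int × Int × Int) Char) d =>
          let vm := pvVis arr (arr.length : Int) ((arr.headD "").length : Int) d.1 d.2 r c oc.2
          (if vm.1 = '#' then oc.1 + 1 else oc.1, vm.2)) (cnt, m)).1
        = ds.foldl (fun count d =>
          let nb := pvSightWhile arr (arr.length : Int) (((arr.headD "").length : Int)) d.1 d.2
            (arr.length + (arr.headD "").length + 1) '.' (r + d.1, c + d.2)
          if nb = '#' then count + 1 else count) cnt ∧
      pvInv arr (arr.length : Int) ((arr.headD "").length : Int)
        (ds.foldl (fun (oc : Int × PySem.Dict (Int × Int × Int × Int) Char) d =>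
          let vm := pvVis arr (arr.length : Int) ((arr.headD "").length : Int) d.1 d.2 r c oc.2
          (if vm.1 = '#' then oc.1 + 1 else oc.1, vm.2)) (cnt, m)).2 := by
    intro ds
    induction ds with
    | nil => intro _ cnt m hmi; exact ⟨rfl, hmi⟩
    | cons d ds ih =>
      intro hds cnt m hmi
      have hd : ¬(d.1 = 0 ∧ d.2 = 0) := hds d List.mem_cons_self
      have hA : pvSightWhile arr (arr.length : Int) (((arr.headD "").length : Int)) d.1 d.2
          (arr.length + (arr.headD "").length + 1) '.' (r + d.1, c + d.2)
          = pvRay arr (arr.length : Int) ((arr.headD "").length : Int) d.1 d.2 r c := by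
        refine pvSightWhile_eq_ray arr _ _ d.1 d.2 hd _ r c ?_
        unfold pvMsr; split_ifs <;> omega
      obtain ⟨hB1, hB2⟩ := pvVis_eq_ray arr (arr.length : Int) ((arr.headD "").length : Int)
        d.1 d.2 r c m hd hmi hr1 hr2 hc1 hc2
      simp only [List.foldl_cons]
      rw [hA, hB1]
      exact ih (fun j hj => hds j (List.mem_cons_of_mem d hj)) _ _ hB2
  have h8 : ∀ d ∈ pvDirsB, ¬(d.1 = 0 ∧ d.2 = 0) := by decide
  have := aux pvDirsB h8 0 memo hm
  simpa only [pvOccLoop, get_sightline_neighbors, pvDirsA, pvDirsB] using this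

theorem pvPush (l : List Char) (c : Char) :
    (String.ofList l).push c = String.ofList (l ++ [c]) := by
  apply String.toList_inj.mp; simp

def pvAStep (arr : List String) (rn : Nat) (acc2 : String × Bool) (col_num : Nat) :
    String × Bool :=
  let tile := pvCell arr (rn : Int) (col_num : Int)
  if tile = '#' ∧ 5 ≤ get_sightline_neighbors (col_num : Int) (rn : Int) arr then
    (acc2.1.push 'L', false)
  else if tile = 'L' ∧ get_sightline_neighbors (col_num : Int) (rn : Int) arr = 0 then
    (acc2.1.push '#', false)
  else (acc2.1.push tile, acc2.2)

def pvBStep (arr : List String) (rn : Nat)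
    (st : List Char × Bool × PySem.Dict (Int × Int × Int × Int) Char) (c : Nat) :
    List Char × Bool × PySem.Dict (Int × Int × Int × Int) Char :=
  let tile := pvCell arr (rn : Int) (c : Int)
  if tile = '#' ∨ tile = 'L' then
    let o := pvOccLoop arr (arr.length : Int) ((arr.headD "").length : Int) (rn : Int) (c : Int) st.2.2
    if tile = '#' ∧ 5 ≤ o.1 then (st.1 ++ ['L'], false, o.2)
    else if tile = 'L' ∧ o.1 = 0 then (st.1 ++ ['#'], false, o.2)
    else (st.1 ++ [tile], st.2.1, o.2)
  else (st.1 ++ [tile], st.2.1, st.2.2)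

def pvARow (arr : List String) (acc : List String × Bool) (row_num : Nat) :
    List String × Bool :=
  let inner := (List.range (arr.headD "").length).foldl (pvAStep arr row_num) ("", acc.2)
  (acc.1 ++ [inner.1], inner.2)

def pvBRow (arr : List String)
    (acc : List String × Bool × PySem.Dict (Int × Int × Int × Int) Char) (r : Nat) :
    List String × Bool × PySem.Dict (Int × Int × Int × Int) Char :=
  let inner := (List.range (arr.headD "").length).foldl (pvBStep arr r) ([], acc.2.1, acc.2.2)
  (acc.1 ++ [String.ofList inner.1], inner.2.1, inner.2.2)

theorem pvPortA_eq (arr : List String) :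
    calc_update_array_sightline_neighbors arr
      = (List.range arr.length).foldl (pvARow arr) ([], true) := rfl

theorem pvPortB_eq (arr : List String) :
    calc_update_array_sightline_neighbors_alt arr
      = if arr.isEmpty then ([], true) else
          let z := (List.range arr.length).foldl (pvBRow arr) ([], true, PySem.Dict.empty)
          (z.1, z.2.1) := rfl

theorem pvStep_rel (arr : List String) (rn cn : Nat)
    (hrn : (rn : Int) < (arr.length : Int))
    (hcn : (cn : Int) < ((arr.headD "").length : Int))
    (s : List Char) (b : Bool) (memo : PySem.Dict (Int × Int × Int × Int) Char)
    (hm : pvInv arr (arr.length : Int) ((arr.headD "").length : Int) memo) :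
    pvAStep arr rn (String.ofList s, b) cn
      = (String.ofList (pvBStep arr rn (s, b, memo) cn).1, (pvBStep arr rn (s, b, memo) cn).2.1) ∧
    pvInv arr (arr.length : Int) ((arr.headD "").length : Int)
      (pvBStep arr rn (s, b, memo) cn).2.2 := by
  obtain ⟨hocc, hinv⟩ := pvOcc_eq_gsn arr (rn : Int) (cn : Int) memo hm
    (Int.natCast_nonneg rn) hrn (Int.natCast_nonneg cn) hcn
  simp only [pvAStep, pvBStep]
  rw [hocc]
  split_ifs <;> simp_all [pvPush]

theorem pvInner (arr : List String) (rn : Nat) (hrn : (rn : Int) < (arr.length : Int)) :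
    ∀ (cols : List Nat), (∀ x ∈ cols, (x : Int) < ((arr.headD "").length : Int)) →
    ∀ (s : List Char) (b : Bool) (memo : PySem.Dict (Int × Int × Int × Int) Char),
    pvInv arr (arr.length : Int) ((arr.headD "").length : Int) memo →
    cols.foldl (pvAStep arr rn) (String.ofList s, b)
      = (String.ofList (cols.foldl (pvBStep arr rn) (s, b, memo)).1,
         (cols.foldl (pvBStep arr rn) (s, b, memo)).2.1) ∧
    pvInv arr (arr.length : Int) ((arr.headD "").length : Int)
      (cols.foldl (pvBStep arr rn) (s, b, memo)).2.2 := by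
  intro cols
  induction cols with
  | nil => intro _ s b memo hm; exact ⟨rfl, hm⟩
  | cons cn cols ih =>
    intro hcols s b memo hm
    obtain ⟨hstep, hinv⟩ := pvStep_rel arr rn cn hrn (hcols cn List.mem_cons_self) s b memo hm
    simp only [List.foldl_cons]
    rw [hstep]
    rcases hB : pvBStep arr rn (s, b, memo) cn with ⟨s', b', m'⟩
    rw [hB] at hinv
    exact ih (fun x hx => hcols x (List.mem_cons_of_mem cn hx)) s' b' m' hinv

theorem pvRow_rel (arr : List String) (rn : Nat) (hrn : (rn : Int) < (arr.length : Int))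
    (accL : List String) (b : Bool) (memo : PySem.Dict (Int × Int × Int × Int) Char)
    (hm : pvInv arr (arr.length : Int) ((arr.headD "").length : Int) memo) :
    pvARow arr (accL, b) rn
      = ((pvBRow arr (accL, b, memo) rn).1, (pvBRow arr (accL, b, memo) rn).2.1) ∧
    pvInv arr (arr.length : Int) ((arr.headD "").length : Int)
      (pvBRow arr (accL, b, memo) rn).2.2 := by
  have hcols : ∀ x ∈ List.range (arr.headD "").length,
      (x : Int) < ((arr.headD "").length : Int) := by
    intro x hx; exact_mod_cast List.mem_range.mp hx
  obtain ⟨h1, h2⟩ := pvInner arr rn hrn (List.range (arr.headD "").length) hcols [] b memo hm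
  simp only [pvARow, pvBRow]
  rw [show ("" : String) = String.ofList [] from rfl, h1]
  exact ⟨rfl, h2⟩

theorem pvOuter (arr : List String) :
    ∀ (rows : List Nat), (∀ x ∈ rows, (x : Int) < (arr.length : Int)) →
    ∀ (accL : List String) (b : Bool) (memo : PySem.Dict (Int × Int × Int × Int) Char),
    pvInv arr (arr.length : Int) ((arr.headD "").length : Int) memo →
    rows.foldl (pvARow arr) (accL, b)
      = ((rows.foldl (pvBRow arr) (accL, b, memo)).1,
         (rows.foldl (pvBRow arr) (accL, b, memo)).2.1) := by
  intro rows
  induction rows with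
  | nil => intro _ accL b memo _; rfl
  | cons rn rows ih =>
    intro hrows accL b memo hm
    obtain ⟨hstep, hinv⟩ := pvRow_rel arr rn (hrows rn List.mem_cons_self) accL b memo hm
    simp only [List.foldl_cons]
    rw [hstep]
    rcases hB : pvBRow arr (accL, b, memo) rn with ⟨accL', b', m'⟩
    rw [hB] at hinv
    exact ih (fun x hx => hrows x (List.mem_cons_of_mem rn hx)) accL' b' m' hinv

theorem pvInv_empty (arr : List String) (R W : Int) :
    pvInv arr R W (PySem.Dict.empty : PySem.Dict (Int × Int × Int × Int) Char) := by
  intro k v h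
  simp [PySem.Dict.empty, PySem.Dict.get?] at h

theorem pv_main (arr : List String) :
    calc_update_array_sightline_neighbors arr = calc_update_array_sightline_neighbors_alt arr := by
  rw [pvPortA_eq, pvPortB_eq]
  cases arr with
  | nil => rfl
  | cons a l =>
    rw [if_neg (by simp)]
    have hrows : ∀ x ∈ List.range (a :: l).length,
        (x : Int) < ((a :: l).length : Int) := by
      intro x hx; exact_mod_cast List.mem_range.mp hx
    exact pvOuter (a :: l) (List.range (a :: l).length) hrows [] true PySem.Dict.empty
      (pvInv_empty _ _ _)

-- ===== VERDICT (by name: the statement is the Claim_ definition above) =====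
theorem calc_update_array_sightline_neighbors_spec : Claim_equal_calc_update_array_sightline_neighbors := by
  intro arr _ _
  unfold Spec_calc_update_array_sightline_neighbors
  exact pv_main arr
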